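-- pv_equiv track=rewrite | github.com/danielpert/terminal-group-screening-Jul2020 | src/update_oplsaa.py | map_atomtypes
-- ===== SOURCE A (Python) =====
-- def map_atomtypes(atoms, to_remove, next_idx, starts_at=800):
--     '''
--     Create mapping from indices of atoms in forcefield
--     file being added to new indices that account for the
--     removal of duplicate hydrogens and that reflect the
--     numbering in the file being added to
--
--     Mapping of -1 means that atom should be removed
--
--     Parameters
--     ----------
--     atoms : dict
--         mapping from atom index to element
--     to_remove : dict
--         keys: index of hydrogen to remove
--         value: index of equivilent hydrogen
--             being kept
--     next_idx : int
--         the next index to be added to oplsaa.xml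
--         (or whatever file is being appended to)
--     starts_at : int, default=800
--         The index that the class numbering starts at
--         in the xml doc passed in, which is 800 from
--         xml documents from the LigParGen server
--
--     Returns
--     ----------
--     mapping : dict
--         keys are old indexes, values are indexes that
--         should replace the old index, or -1 if the atom
--         with the index should be removed
--     mapping4angles_dihedrals : dict
--         similar to `mapping`, but hydrogens to be deleted
--         map to the equivilent hydrogen that is being kept
--         instead of mapping to -1. This is because some
--         angles and dihedrals involve multiple equivilent
--         hydrogens, and deleting all of the angles and dihedrals
--         that contain a duplicate hydrogen will result in
--         some angle and dihedral parameters being left out of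
--         the force field. This mapping is used for angles,
--         propers, and impropers.
--
--     '''
--     def find_subtract_by(atom):
--         '''
--         Find the `subtract_by` variable
--         for an atom given the atom id
--         '''
--         if mapping.get(atom + starts_at) is not None:
--             return -mapping.get(atom + starts_at) + atom + next_idx
--         else:
--             subtract_by = 0
--             for h_to_remove, equiv_h in to_remove.items():
--                 if h_to_remove < atom:
--                     subtract_by += 1
--             return subtract_by
--     mapping = dict()
--     mapping4angles_dihedrals = dict()
--     for atom_id in list(atoms.keys()):
--         subtract_by = 0
--         for h_to_remove, equiv_h in to_remove.items():
--             if h_to_remove < atom_id: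
--                 subtract_by += 1
--             elif h_to_remove == atom_id:
--                 mapping[atom_id + starts_at] = -1
--                 mapping4angles_dihedrals[atom_id + starts_at] = equiv_h - find_subtract_by(equiv_h) + next_idx
--                 break
--         else:
--             map_from = atom_id + starts_at
--             map_to = atom_id - subtract_by + next_idx
--             mapping[map_from] = map_to
--             mapping4angles_dihedrals[map_from] = map_to
--     return mapping, mapping4angles_dihedrals
-- ===== SOURCE B (Python) =====
-- from bisect import bisect_left
--
-- def map_atomtypes(atoms, to_remove, next_idx, starts_at=800):
--     # Sorted list of removed-hydrogen indices: the shift of an atom index is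
--     # the number of removed indices below it, found by binary search.
--     removed_sorted = sorted(to_remove)
--
--     def shift(atom):
--         return bisect_left(removed_sorted, atom)
--
--     mapping = {}
--     mapping4angles_dihedrals = {}
--     seen_removed = set()
--     for atom_id in atoms:
--         key = atom_id + starts_at
--         if atom_id in to_remove:
--             seen_removed.add(atom_id)
--             mapping[key] = -1
--             equiv = to_remove[atom_id]
--             if equiv in seen_removed:
--                 mapping4angles_dihedrals[key] = -1
--             else:
--                 mapping4angles_dihedrals[key] = equiv - shift(equiv) + next_idx
--         else:
--             value = atom_id - shift(atom_id) + next_idx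
--             mapping[key] = value
--             mapping4angles_dihedrals[key] = value
--     return mapping, mapping4angles_dihedrals
-- ===== Notes on version B (the rewrite author's own statement) =====
-- stated objective: faster
-- what changed: Replaces A's per-atom linear rescan of to_remove (and its lookup back into the partially built mapping inside find_subtract_by) with a sorted list of removed indices queried by bisect_left plus a running set of already-seen removed atoms, so each atom is handled in O(log R).
import Mathlib
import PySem

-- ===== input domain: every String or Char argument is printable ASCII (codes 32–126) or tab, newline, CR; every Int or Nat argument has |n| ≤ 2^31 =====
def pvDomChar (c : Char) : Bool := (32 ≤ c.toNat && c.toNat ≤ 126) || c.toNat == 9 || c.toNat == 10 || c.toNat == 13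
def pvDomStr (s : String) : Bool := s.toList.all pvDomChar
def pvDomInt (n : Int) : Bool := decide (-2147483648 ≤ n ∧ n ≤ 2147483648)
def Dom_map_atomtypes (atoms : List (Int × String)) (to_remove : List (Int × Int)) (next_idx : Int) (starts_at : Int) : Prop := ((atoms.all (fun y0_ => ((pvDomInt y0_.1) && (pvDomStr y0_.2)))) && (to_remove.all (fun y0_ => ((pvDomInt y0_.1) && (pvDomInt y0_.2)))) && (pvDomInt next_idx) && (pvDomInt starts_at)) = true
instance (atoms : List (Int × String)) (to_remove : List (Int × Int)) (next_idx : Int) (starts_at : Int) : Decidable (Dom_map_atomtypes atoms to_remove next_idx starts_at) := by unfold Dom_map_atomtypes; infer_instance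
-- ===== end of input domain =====

-- B replaces A's quadratic rescans of `to_remove` (and its lookup back into the partially built
-- mapping) by one sorted list of removed indices queried with bisect_left plus a running set of
-- already-removed atoms; objective: faster (O((A+R) log R) loop structure instead of O(A·R)).

-- ===== PORT A =====
-- A's inner 'for h_to_remove, equiv_h in to_remove.items(): if <: count / elif ==: break / else (no break)':
-- returns (some equiv_h, count so far) on break, (none, count of keys < atomId) when the loop finishes
def pvScanA (atomId : Int) : List (Int × Int) → Int → Option Int × Int
  | [], acc => (none, acc)
  | (k, e) :: rest, acc =>
    if k < atomId then pvScanA atomId rest (acc + 1)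
    else if k == atomId then (some e, acc)
    else pvScanA atomId rest acc

-- A's inner function find_subtract_by
def pvFindA (mapping : PySem.Dict Int Int) (trmItems : List (Int × Int))
    (nextIdx startsAt atom : Int) : Int :=
  match mapping.get? (atom + startsAt) with
  | some v => -v + atom + nextIdx
  | none => trmItems.foldl (fun s p => if p.1 < atom then s + 1 else s) 0

-- body of A's 'for atom_id in list(atoms.keys())' loop
def pvStepA (trmItems : List (Int × Int)) (nextIdx startsAt : Int)
    (st : PySem.Dict Int Int × PySem.Dict Int Int) (atomId : Int) :
    PySem.Dict Int Int × PySem.Dict Int Int :=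
  match pvScanA atomId trmItems 0 with
  | (some equivH, _) =>
      let mapping := st.1.insert (atomId + startsAt) (-1)
      (mapping, st.2.insert (atomId + startsAt)
        (equivH - pvFindA mapping trmItems nextIdx startsAt equivH + nextIdx))
  | (none, subtractBy) =>
      let mapTo := atomId - subtractBy + nextIdx
      (st.1.insert (atomId + startsAt) mapTo, st.2.insert (atomId + startsAt) mapTo)

def map_atomtypes (atoms : List (Int × String)) (to_remove : List (Int × Int)) (next_idx : Int) (starts_at : Int) : (List (Int × Int)) × (List (Int × Int)) :=
  let atomsD := PySem.Dict.ofList atoms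
  let trmD := PySem.Dict.ofList to_remove
  let r := atomsD.keys.foldl (pvStepA trmD.items next_idx starts_at)
    (PySem.Dict.empty, PySem.Dict.empty)
  (r.1.items, r.2.items)

-- ===== PORT B =====
def pvShiftB (removedSorted : List Int) (atom : Int) : Int :=
  ((PySem.List.bisectLeft removedSorted atom : Nat) : Int)

-- body of B's loop
def pvStepB (trmD : PySem.Dict Int Int) (removedSorted : List Int) (nextIdx startsAt : Int)
    (st : PySem.Dict Int Int × PySem.Dict Int Int × PySem.Set Int) (atomId : Int) :
    PySem.Dict Int Int × PySem.Dict Int Int × PySem.Set Int :=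
  if trmD.contains atomId then
    let seen := PySem.Set.add st.2.2 atomId
    let equiv := (trmD.get? atomId).getD 0
    let v4 := if PySem.Set.contains seen equiv then -1
              else equiv - pvShiftB removedSorted equiv + nextIdx
    (st.1.insert (atomId + startsAt) (-1), st.2.1.insert (atomId + startsAt) v4, seen)
  else
    let v := atomId - pvShiftB removedSorted atomId + nextIdx
    (st.1.insert (atomId + startsAt) v, st.2.1.insert (atomId + startsAt) v, st.2.2)

def map_atomtypes_alt (atoms : List (Int × String)) (to_remove : List (Int × Int)) (next_idx : Int) (starts_at : Int) : (List (Int × Int)) × (List (Int × Int)) :=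
  let trmD := PySem.Dict.ofList to_remove
  let removedSorted := PySem.List.sorted trmD.keys id false
  let r := (PySem.Dict.ofList atoms).keys.foldl
    (pvStepB trmD removedSorted next_idx starts_at)
    (PySem.Dict.empty, PySem.Dict.empty, PySem.Set.empty)
  (r.1.items, r.2.1.items)

-- ===== PRECONDITION & SPEC =====
def Spec_map_atomtypes (atoms : List (Int × String)) (to_remove : List (Int × Int)) (next_idx : Int) (starts_at : Int) (out : (List (Int × Int)) × (List (Int × Int))) : Prop := out = map_atomtypes_alt atoms to_remove next_idx starts_at
instance (atoms : List (Int × String)) (to_remove : List (Int × Int)) (next_idx : Int) (starts_at : Int) (out : (List (Int × Int)) × (List (Int × Int))) : Decidable (Spec_map_atomtypes atoms to_remove next_idx starts_at out) := by unfold Spec_map_atomtypes; infer_instance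

-- ===== CLAIM (what is proved, stated in full; the proofs are below) =====
def Claim_equal_map_atomtypes : Prop := ∀ (atoms : List (Int × String)) (to_remove : List (Int × Int)) (next_idx : Int) (starts_at : Int), Dom_map_atomtypes atoms to_remove next_idx starts_at → Spec_map_atomtypes atoms to_remove next_idx starts_at (map_atomtypes atoms to_remove next_idx starts_at)

-- ===== LEMMAS AND PROOFS =====

-- the count of `to_remove` keys strictly below `x` (value both programs subtract)
def pvCnt (trmD : PySem.Dict Int Int) (x : Int) : Int :=
  (trmD.items.countP (fun p => p.1 < x) : Nat)

-- the value `mapping` ends up holding for a processed atom x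
def pvVal (trmD : PySem.Dict Int Int) (nextIdx : Int) (x : Int) : Int :=
  if trmD.contains x then -1 else x - pvCnt trmD x + nextIdx

-- the mapping dict after the atoms of p have been processed
def pvMk (trmD : PySem.Dict Int Int) (nextIdx startsAt : Int) (p : List Int) :
    PySem.Dict Int Int :=
  PySem.Dict.mk (p.map fun x => (x + startsAt, pvVal trmD nextIdx x))

theorem pvScanA_not_mem (a : Int) (items : List (Int × Int)) (acc : Int)
    (h : ∀ q ∈ items, q.1 ≠ a) :
    pvScanA a items acc = (none, acc + (items.countP (fun p => p.1 < a) : Nat)) := by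
  induction items generalizing acc with
  | nil => simp [pvScanA]
  | cons q rest ih =>
    obtain ⟨k, e⟩ := q
    have hk : k ≠ a := h (k, e) (by simp)
    have hrest : ∀ q ∈ rest, q.1 ≠ a := fun q hq => h q (by simp [hq])
    by_cases hlt : k < a
    · simp only [pvScanA, if_pos hlt, ih (acc + 1) hrest, List.countP_cons]
      simp [hlt]
      ring
    · simp only [pvScanA, if_neg hlt, beq_iff_eq, if_neg hk, ih acc hrest, List.countP_cons]
      simp [hlt]

theorem pvScanA_mem (a e : Int) (items : List (Int × Int)) (acc : Int)
    (hnd : (items.map Prod.fst).Nodup) (hmem : (a, e) ∈ items) :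
    (pvScanA a items acc).1 = some e := by
  induction items generalizing acc with
  | nil => simp at hmem
  | cons q rest ih =>
    obtain ⟨k, v⟩ := q
    simp only [List.map_cons, List.nodup_cons] at hnd
    rcases List.mem_cons.mp hmem with heq | hmem'
    · have hk : k = a := (congrArg Prod.fst heq).symm
      have he : v = e := (congrArg Prod.snd heq).symm
      subst hk; subst he
      simp [pvScanA]
    · have hk : k ≠ a := by
        intro hka
        exact hnd.1 (hka ▸ (List.mem_map_of_mem (f := Prod.fst) hmem' : a ∈ rest.map Prod.fst))
      by_cases hlt : k < a
      · simp only [pvScanA, if_pos hlt]; exact ih (acc + 1) hnd.2 hmem'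
      · simp only [pvScanA, if_neg hlt, beq_iff_eq, if_neg hk]
        exact ih acc hnd.2 hmem'

theorem bisect_countP (xs : List Int) (x : Int) (h : xs.Pairwise (· ≤ ·)) :
    PySem.List.bisectLeft xs x = xs.countP (fun y => y < x) := by
  obtain ⟨hb, hlt, hge⟩ := PySem.List.bisectLeft_spec xs x h
  set b := PySem.List.bisectLeft xs x with hbdef
  have h1 : (xs.take b).countP (fun y => y < x) = (xs.take b).length := by
    apply List.countP_eq_length.mpr
    intro y hy
    obtain ⟨j, hj, rfl⟩ := List.mem_iff_getElem.mp hy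
    have hjb : j < b := lt_of_lt_of_le hj (by simp [List.length_take])
    have hjl : j < xs.length := lt_of_lt_of_le hj (by simp [List.length_take])
    simpa [List.getElem_take] using hlt j hjl hjb
  have h2 : (xs.drop b).countP (fun y => y < x) = 0 := by
    apply List.countP_eq_zero.mpr
    intro y hy
    obtain ⟨j, hj, rfl⟩ := List.mem_iff_getElem.mp hy
    have hjl : b + j < xs.length := by
      have := hj; simp [List.length_drop] at this; omega
    rw [List.getElem_drop]
    have := hge (b + j) hjl (Nat.le_add_right _ _)
    simp
    omega
  have hcalc : xs.countP (fun y => y < x) = b := by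
    conv_lhs => rw [← List.take_append_drop b xs]
    rw [List.countP_append, h1, h2, List.length_take]
    omega
  omega

-- the two programs' shift agree: bisect on the sorted keys = count of keys below
theorem pvShift_eq_cnt (trmD : PySem.Dict Int Int) (x : Int) :
    pvShiftB (PySem.List.sorted trmD.keys id false) x = pvCnt trmD x := by
  unfold pvShiftB pvCnt
  rw [bisect_countP _ x (by simpa using PySem.List.sorted_pairwise trmD.keys id)]
  congr 1
  rw [(PySem.List.sorted_perm trmD.keys id false).countP_eq]
  show trmD.keys.countP _ = _
  rw [show trmD.keys = trmD.items.map Prod.fst from rfl, List.countP_map]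
  rfl

theorem pvMk_get? (trmD : PySem.Dict Int Int) (nextIdx startsAt : Int)
    (p : List Int) (hnd : p.Nodup) (e : Int) :
    (pvMk trmD nextIdx startsAt p).get? (e + startsAt)
      = if e ∈ p then some (pvVal trmD nextIdx e) else none := by
  induction p with
  | nil => simp [pvMk, PySem.Dict.get?]
  | cons a rest ih =>
    simp only [List.nodup_cons] at hnd
    show (PySem.Dict.mk ((a + startsAt, pvVal trmD nextIdx a) ::
      (rest.map fun x => (x + startsAt, pvVal trmD nextIdx x)))).get? (e + startsAt) = _
    rw [PySem.Dict.get?_mk_cons]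
    by_cases he : a = e
    · subst he; simp
    · rw [if_neg (by simp; omega)]
      rw [show PySem.Dict.mk (rest.map fun x => (x + startsAt, pvVal trmD nextIdx x))
            = pvMk trmD nextIdx startsAt rest from rfl, ih hnd.2]
      simp [Ne.symm he]

theorem pvMk_append (trmD : PySem.Dict Int Int) (nextIdx startsAt : Int)
    (p : List Int) (a : Int) (ha : a ∉ p) (v : Int) (hv : v = pvVal trmD nextIdx a) :
    (pvMk trmD nextIdx startsAt p).insert (a + startsAt) v
      = pvMk trmD nextIdx startsAt (p ++ [a]) := by
  apply PySem.Dict.ext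
  rw [PySem.Dict.items_insert_of_not_contains]
  · simp [pvMk, hv]
  · rw [PySem.Dict.contains_eq_decide_mem_keys]
    simp only [pvMk, PySem.Dict.keys_mk, List.map_map, decide_eq_false_iff_not]
    intro hmem
    obtain ⟨x, hx, hxe⟩ := List.mem_map.mp hmem
    simp at hxe
    have : x = a := by omega
    exact ha (this ▸ hx)

-- value of A's find_subtract_by against the characterized mapping state
theorem pvFindA_mk (trmD : PySem.Dict Int Int) (nextIdx startsAt : Int)
    (p : List Int) (hnd : p.Nodup) (e : Int) :
    pvFindA (pvMk trmD nextIdx startsAt p) trmD.items nextIdx startsAt e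
      = if e ∈ p ∧ trmD.contains e = true then 1 + e + nextIdx else pvCnt trmD e := by
  unfold pvFindA
  rw [pvMk_get? trmD nextIdx startsAt p hnd e]
  by_cases hep : e ∈ p
  · by_cases hc : trmD.contains e = true
    · simp [hep, hc, pvVal]
    · simp [hep, hc, pvVal]; ring
  · have hne : ¬(e ∈ p ∧ trmD.contains e = true) := by tauto
    simp only [if_neg hep, if_neg hne]
    have hfc := PySem.List.foldl_count_if (fun q : Int × Int => decide (q.1 < e)) trmD.items 0
    simp only [decide_eq_true_eq] at hfc
    rw [hfc]
    simp [pvCnt]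

-- the two loop bodies' mapping4 value for a removed atom agree
theorem pvV4_eq (trmD : PySem.Dict Int Int) (nextIdx : Int)
    (p : List Int) (a e : Int) (hca : trmD.contains a = true)
    (hap : a ∉ p) :
    e - (if e ∈ p ++ [a] ∧ trmD.contains e = true then 1 + e + nextIdx else pvCnt trmD e) + nextIdx
      = if PySem.Set.contains (PySem.Set.add (p.filter (fun x => trmD.contains x)) a) e = true then -1
        else e - pvCnt trmD e + nextIdx := by
  have hseen : PySem.Set.contains (PySem.Set.add (p.filter (fun x => trmD.contains x)) a) e = true
      ↔ (e ∈ p ++ [a] ∧ trmD.contains e = true) := by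
    rw [PySem.Set.contains_iff, PySem.Set.mem_add]
    simp only [List.mem_filter, List.mem_append, List.mem_singleton]
    constructor
    · rintro (⟨hep, hc⟩ | rfl)
      · exact ⟨Or.inl hep, hc⟩
      · exact ⟨Or.inr rfl, hca⟩
    · rintro ⟨hep | rfl, hc⟩
      · exact Or.inl ⟨hep, hc⟩
      · exact Or.inr rfl
  by_cases hcond : e ∈ p ++ [a] ∧ trmD.contains e = true
  · rw [if_pos hcond, if_pos (hseen.mpr hcond)]; ring
  · rw [if_neg hcond, if_neg (by rw [hseen]; exact hcond)]

-- core loop lemma: from corresponding states, A's loop and B's loop build the same two dicts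
theorem pvLoop (trmD : PySem.Dict Int Int) (nextIdx startsAt : Int)
    (htrm : trmD.keys.Nodup) (rest : List Int) :
    ∀ (p : List Int) (m4 : PySem.Dict Int Int), (p ++ rest).Nodup →
    List.foldl (pvStepA trmD.items nextIdx startsAt)
        (pvMk trmD nextIdx startsAt p, m4) rest
      = (fun st => (st.1, st.2.1))
        (List.foldl (pvStepB trmD (PySem.List.sorted trmD.keys id false) nextIdx startsAt)
          (pvMk trmD nextIdx startsAt p, m4, p.filter (fun x => trmD.contains x)) rest) := by
  induction rest with
  | nil => intro p m4 _; rfl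
  | cons a rest ih =>
    intro p m4 hnd
    have hndp : p.Nodup := (List.nodup_append.mp hnd).1
    have hap : a ∉ p := fun h =>
      (List.nodup_append.mp hnd).2.2 a h a (List.mem_cons_self) rfl
    have hnd' : ((p ++ [a]) ++ rest).Nodup := by rw [List.append_assoc]; exact hnd
    have hndpa : (p ++ [a]).Nodup := (List.nodup_append.mp hnd').1
    simp only [List.foldl_cons]
    by_cases hca : trmD.contains a = true
    · -- a is a removed hydrogen
      obtain ⟨w, hw⟩ : ∃ w, trmD.get? a = some w := by
        rcases ho : trmD.get? a with _ | w
        · rw [PySem.Dict.contains_eq_isSome_get?, ho] at hca; simp at hca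
        · exact ⟨w, rfl⟩
      have hwmem : (a, w) ∈ trmD.items :=
        (PySem.Dict.get?_eq_some_iff_mem_items trmD a w htrm).mp hw
      have hscan : (pvScanA a trmD.items 0).1 = some w :=
        pvScanA_mem a w trmD.items 0 htrm hwmem
      have hstepA : pvStepA trmD.items nextIdx startsAt (pvMk trmD nextIdx startsAt p, m4) a
          = (pvMk trmD nextIdx startsAt (p ++ [a]),
             m4.insert (a + startsAt)
               (if PySem.Set.contains (PySem.Set.add (p.filter (fun x => trmD.contains x)) a) w = true
                then -1 else w - pvCnt trmD w + nextIdx)) := by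
        unfold pvStepA
        rw [show pvScanA a trmD.items 0 = (some w, (pvScanA a trmD.items 0).2) from
          Prod.ext hscan rfl]
        simp only
        rw [pvMk_append trmD nextIdx startsAt p a hap (-1) (by simp [pvVal, hca])]
        rw [pvFindA_mk trmD nextIdx startsAt (p ++ [a]) hndpa w]
        rw [pvV4_eq trmD nextIdx p a w hca hap]
      have hstepB : pvStepB trmD (PySem.List.sorted trmD.keys id false) nextIdx startsAt
            (pvMk trmD nextIdx startsAt p, m4, p.filter (fun x => trmD.contains x)) a
          = (pvMk trmD nextIdx startsAt (p ++ [a]),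
             m4.insert (a + startsAt)
               (if PySem.Set.contains (PySem.Set.add (p.filter (fun x => trmD.contains x)) a) w = true
                then -1 else w - pvCnt trmD w + nextIdx),
             (p ++ [a]).filter (fun x => trmD.contains x)) := by
        unfold pvStepB
        rw [if_pos hca]
        simp only [hw, Option.getD_some, pvShift_eq_cnt]
        rw [pvMk_append trmD nextIdx startsAt p a hap (-1) (by simp [pvVal, hca])]
        rw [show (p ++ [a]).filter (fun x => trmD.contains x)
              = PySem.Set.add (p.filter (fun x => trmD.contains x)) a by
          rw [List.filter_append]
          simp only [List.filter_cons, hca]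
          have hnc : ¬ (PySem.Set.contains (p.filter (fun x => trmD.contains x)) a = true) :=
            fun h => hap (List.mem_filter.mp ((PySem.Set.contains_iff _ _).mp h)).1
          rw [show PySem.Set.add (p.filter (fun x => trmD.contains x)) a
                = p.filter (fun x => trmD.contains x) ++ [a] by
            unfold PySem.Set.add
            rw [if_neg hnc]]
          rfl]
      rw [hstepA, hstepB, ih (p ++ [a]) _ hnd']
    · -- a is kept
      have hnmem : ∀ q ∈ trmD.items, q.1 ≠ a := by
        intro q hq hqa
        rw [PySem.Dict.contains_eq_decide_mem_keys] at hca
        simp only [decide_eq_true_eq] at hca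
        exact hca (hqa ▸ PySem.Dict.mem_keys_of_mem_items trmD hq)
      have hstepA : pvStepA trmD.items nextIdx startsAt (pvMk trmD nextIdx startsAt p, m4) a
          = (pvMk trmD nextIdx startsAt (p ++ [a]),
             m4.insert (a + startsAt) (a - pvCnt trmD a + nextIdx)) := by
        unfold pvStepA
        rw [pvScanA_not_mem a trmD.items 0 hnmem]
        simp only [zero_add]
        rw [pvMk_append trmD nextIdx startsAt p a hap _ (by simp [pvVal, pvCnt, hca])]
        simp [pvCnt]
      have hstepB : pvStepB trmD (PySem.List.sorted trmD.keys id false) nextIdx startsAt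
            (pvMk trmD nextIdx startsAt p, m4, p.filter (fun x => trmD.contains x)) a
          = (pvMk trmD nextIdx startsAt (p ++ [a]),
             m4.insert (a + startsAt) (a - pvCnt trmD a + nextIdx),
             (p ++ [a]).filter (fun x => trmD.contains x)) := by
        unfold pvStepB
        rw [if_neg (by simp [hca])]
        simp only [pvShift_eq_cnt]
        rw [pvMk_append trmD nextIdx startsAt p a hap _ (by simp [pvVal, hca])]
        rw [List.filter_append]
        simp [hca]
      rw [hstepA, hstepB, ih (p ++ [a]) _ hnd']

-- ===== VERDICT (by name: the statement is the Claim_ definition above) =====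
theorem map_atomtypes_spec : Claim_equal_map_atomtypes := by
  intro atoms to_remove next_idx starts_at _
  unfold Spec_map_atomtypes map_atomtypes map_atomtypes_alt
  have h := pvLoop (PySem.Dict.ofList to_remove) next_idx starts_at
    (PySem.Dict.nodup_keys_ofList to_remove) (PySem.Dict.ofList atoms).keys
    [] PySem.Dict.empty (by simp [PySem.Dict.nodup_keys_ofList atoms])
  rw [show pvMk (PySem.Dict.ofList to_remove) next_idx starts_at [] = PySem.Dict.empty from rfl] at h
  rw [show ([] : List Int).filter (fun x => (PySem.Dict.ofList to_remove).contains x) = PySem.Set.empty from rfl] at h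
  simp only [h]
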